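-- pv_equiv track=rewrite | github.com/Vros15/password-strength-analyzer- | analyzer/rules.py | repeated_characters_rule
-- ===== SOURCE A (Python) =====
-- def repeated_characters_rule(password: str) -> tuple[int, str | None]:
--     """
--     Penalizes excessive repeated characters.
--     """
--     if not password:
--         return 0, None
--
--     max_run = 1
--     current_run = 1
--
--     for i in range(1, len(password)):
--         if password[i] == password[i - 1]:
--             current_run += 1
--             max_run = max(max_run, current_run)
--         else:
--             current_run = 1
--
--     if max_run >= 4:
--         return -15, "Password contains repeated characters"
--
--     return 0, None
-- ===== SOURCE B (Python) =====
-- def repeated_characters_rule(password: str) -> tuple[int, str | None]: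
--     """
--     Penalizes excessive repeated characters.
--     """
--     if any(password[i] == password[i + 1] == password[i + 2] == password[i + 3]
--            for i in range(len(password) - 3)):
--         return -15, "Password contains repeated characters"
--     return 0, None
-- ===== Notes on version B (the rewrite author's own statement) =====
-- stated objective: simpler
-- what changed: Replaced the max_run/current_run counter scan (with its separate empty-string guard) by a single existence check over all 4-character windows: any(password[i]==password[i+1]==password[i+2]==password[i+3] for i in range(len(password)-3)).
import Mathlib
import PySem

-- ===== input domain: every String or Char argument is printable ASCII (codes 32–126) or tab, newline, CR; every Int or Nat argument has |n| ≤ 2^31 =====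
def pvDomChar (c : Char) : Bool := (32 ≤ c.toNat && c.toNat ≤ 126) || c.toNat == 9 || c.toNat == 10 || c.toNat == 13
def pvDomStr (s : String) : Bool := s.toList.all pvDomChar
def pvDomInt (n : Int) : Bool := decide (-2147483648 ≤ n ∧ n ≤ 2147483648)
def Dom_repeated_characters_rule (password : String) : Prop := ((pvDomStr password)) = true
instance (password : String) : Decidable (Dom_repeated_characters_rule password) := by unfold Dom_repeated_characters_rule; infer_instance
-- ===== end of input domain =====

-- B replaces A's max_run/current_run counter scan (and its separate empty-string guard) by a single existence check over all 4-character windows; a different decomposition of the same O(n) task.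


-- ===== PORT A =====
def repeated_characters_rule (password : String) : Int × Option String :=
  if password.toList.isEmpty then (0, none)
  else
    if 4 ≤ ((PySem.List.pyRange 1 (password.toList.length : Int) 1).foldl
      (fun (p : Int × Int) i =>
        if PySem.List.pyGet? password.toList i == PySem.List.pyGet? password.toList (i - 1) then
          (max p.1 (p.2 + 1), p.2 + 1)
        else (p.1, 1)) (1, 1)).1 then (-15, some "Password contains repeated characters") else (0, none)

-- ===== PORT B =====
def repeated_characters_rule_alt (password : String) : Int × Option String :=
  if (PySem.List.pyRange 0 ((password.toList.length : Int) - 3) 1).any (fun i =>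
        (PySem.List.pyGet? password.toList i == PySem.List.pyGet? password.toList (i + 1)) &&
        (PySem.List.pyGet? password.toList (i + 1) == PySem.List.pyGet? password.toList (i + 2)) &&
        (PySem.List.pyGet? password.toList (i + 2) == PySem.List.pyGet? password.toList (i + 3)))
  then (-15, some "Password contains repeated characters") else (0, none)

-- ===== PRECONDITION & SPEC =====
def Spec_repeated_characters_rule (password : String) (out : Int × Option String) : Prop := out = repeated_characters_rule_alt password
instance (password : String) (out : Int × Option String) : Decidable (Spec_repeated_characters_rule password out) := by unfold Spec_repeated_characters_rule; infer_instance

-- ===== CLAIM (what is proved, stated in full; the proofs are below) =====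
def Claim_equal_repeated_characters_rule : Prop := ∀ (password : String), Dom_repeated_characters_rule password → Spec_repeated_characters_rule password (repeated_characters_rule password)

-- ===== LEMMAS AND PROOFS =====

def scanRun (prev : Char) (p : Int × Int) : List Char → Int × Int
  | [] => p
  | x :: xs => if x == prev then scanRun x (max p.1 (p.2 + 1), p.2 + 1) xs else scanRun x (p.1, 1) xs

def needRun (prev : Char) (k : Nat) : List Char → Bool
  | [] => false
  | x :: xs => if x == prev then (decide (k ≤ 1) || needRun x (k - 1) xs) else needRun x 3 xs

def hasRun4 : List Char → Bool
  | a :: b :: c :: d :: t => (a == b && b == c && c == d) || hasRun4 (b :: c :: d :: t)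
  | _ => false

def leadEq (p : Char) : Nat → List Char → Bool
  | 0, _ => true
  | _ + 1, [] => false
  | k + 1, x :: t => x == p && leadEq p k t

theorem hasRun4_short (l : List Char) (h : l.length ≤ 3) : hasRun4 l = false := by
  rcases l with _ | ⟨a, _ | ⟨b, _ | ⟨c, _ | ⟨d, t⟩⟩⟩⟩ <;> first | rfl | (simp at h; omega)

theorem leadEq_mono (p : Char) : ∀ (t : List Char) (j k : Nat), j ≤ k →
    leadEq p k t = true → leadEq p j t = true := by
  intro t
  induction t with
  | nil =>
    intro j k hjk h
    cases k with
    | zero => interval_cases j; exact h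
    | succ k => exact absurd h (by simp [leadEq])
  | cons x t ih =>
    intro j k hjk h
    cases j with
    | zero => rfl
    | succ j =>
      cases k with
      | zero => omega
      | succ k =>
        simp only [leadEq, Bool.and_eq_true] at h ⊢
        exact ⟨h.1, ih _ _ (by omega) h.2⟩

theorem leadEq_or_hasRun (p : Char) (t : List Char) :
    (leadEq p 3 t || hasRun4 t) = hasRun4 (p :: t) := by
  rcases t with _ | ⟨a, _ | ⟨b, _ | ⟨c, r⟩⟩⟩
  · simp [leadEq, hasRun4]
  · simp [leadEq, hasRun4]
  · simp [leadEq, hasRun4]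
  · simp only [leadEq, hasRun4, Bool.and_true]
    have hw : (a == p && (b == p && c == p)) = (p == a && a == b && b == c) := by
      apply Bool.eq_iff_iff.mpr
      simp only [Bool.and_eq_true, beq_iff_eq, and_assoc]
      constructor
      · rintro ⟨h1, h2, h3⟩; subst_vars; simp
      · rintro ⟨h1, h2, h3⟩; subst_vars; simp
    rw [hw]

theorem needRun_eq (xs : List Char) : ∀ (prev : Char) (k : Nat), 1 ≤ k → k ≤ 3 →
    needRun prev k xs = (leadEq prev k xs || hasRun4 xs) := by
  induction xs with
  | nil =>
    intro prev k h1 h3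
    cases k with
    | zero => omega
    | succ k => rfl
  | cons x t ih =>
    intro prev k h1 h3
    by_cases hx : (x == prev) = true
    · have hxe : x = prev := eq_of_beq hx
      subst hxe
      interval_cases k
      · simp [needRun, leadEq]
      · have h2 := ih x 1 (by omega) (by omega)
        simp only [needRun, beq_self_eq_true, Nat.reduceLeDiff, decide_false,
          Bool.false_or, leadEq, beq_self_eq_true, Bool.true_and]
        rw [h2, ← leadEq_or_hasRun x t]
        cases h1b : leadEq x 1 t
        · cases h3b : leadEq x 3 t
          · simp
          · exact absurd (leadEq_mono x t 1 3 (by omega) h3b) (by simp [h1b])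
        · simp
      · have h2 := ih x 2 (by omega) (by omega)
        simp only [needRun, beq_self_eq_true, Nat.reduceLeDiff, decide_false,
          Bool.false_or, leadEq, beq_self_eq_true, Bool.true_and]
        rw [h2, ← leadEq_or_hasRun x t]
        cases h2b : leadEq x 2 t
        · cases h3b : leadEq x 3 t
          · simp
          · exact absurd (leadEq_mono x t 2 3 (by omega) h3b) (by simp [h2b])
        · simp
    · have hx' : (x == prev) = false := by simpa using hx
      obtain ⟨j, rfl⟩ : ∃ j, k = j + 1 := ⟨k - 1, by omega⟩
      have h2 := ih x 3 (by omega) (by omega)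
      simp [needRun, leadEq, hx', h2, leadEq_or_hasRun]

theorem scanRun_ge4 (xs : List Char) : ∀ (prev : Char) (m c : Int), 1 ≤ c → c ≤ m →
    (4 ≤ (scanRun prev (m, c) xs).1 ↔ (4 ≤ m ∨ needRun prev (4 - c).toNat xs = true)) := by
  induction xs with
  | nil => intro prev m c h1 h2; simp [scanRun, needRun]
  | cons x xs ih =>
    intro prev m c h1 h2
    by_cases hx : (x == prev) = true
    · simp only [scanRun, needRun, hx, if_pos]
      rw [ih x (max m (c+1)) (c+1) (by omega) (le_max_right _ _)]
      have h3 : (4 - (c+1)).toNat = (4 - c).toNat - 1 := by omega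
      have h4 : (decide ((4 - c).toNat ≤ 1) = true) ↔ 4 ≤ c + 1 := by simp; omega
      rw [h3]
      constructor
      · rintro (hm | hn)
        · rcases le_max_iff.mp hm with h | h
          · exact Or.inl h
          · exact Or.inr (Bool.or_eq_true_iff.mpr (Or.inl (h4.mpr h)))
        · exact Or.inr (Bool.or_eq_true_iff.mpr (Or.inr hn))
      · rintro (hm | hn)
        · exact Or.inl (le_max_of_le_left hm)
        · rcases Bool.or_eq_true_iff.mp hn with h | h
          · exact Or.inl (le_max_of_le_right (by have := h4.mp h; omega))
          · exact Or.inr h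
    · have hx' : (x == prev) = false := by simpa using hx
      simp only [scanRun, needRun, hx', Bool.false_eq_true, if_false]
      have h0 : ((4:Int) - 1).toNat = 3 := by omega
      rw [ih x m 1 le_rfl (by omega), h0]

theorem foldA_aux (rest : List Char) : ∀ (pre : List Char) (prev : Char) (p : Int × Int),
    pre ≠ [] → pre.getLast? = some prev →
    (PySem.List.pyRange (pre.length : Int) ((pre.length + rest.length : Nat) : Int) 1).foldl
      (fun (p : Int × Int) i =>
        if PySem.List.pyGet? (pre ++ rest) i == PySem.List.pyGet? (pre ++ rest) (i - 1) then
          (max p.1 (p.2 + 1), p.2 + 1)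
        else (p.1, 1)) p = scanRun prev p rest := by
  induction rest with
  | nil =>
    intro pre prev p hne hlast
    rw [PySem.List.pyRange_one_eq_nil (by simp)]
    rfl
  | cons x xs ih =>
    intro pre prev p hne hlast
    have hL : 0 < pre.length := by
      cases pre with
      | nil => exact absurd rfl hne
      | cons h t => simp
    rw [PySem.List.pyRange_one_cons (by simp only [List.length_cons]; push_cast; omega)]
    simp only [List.foldl_cons]
    have hget1 : PySem.List.pyGet? (pre ++ x :: xs) ((pre.length : Nat) : Int) = some x :=
      PySem.List.pyGet?_append_length pre xs x
    have hget0 : PySem.List.pyGet? (pre ++ x :: xs) ((pre.length : Int) - 1) = some prev := by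
      rw [show ((pre.length : Int) - 1) = ((pre.length - 1 : Nat) : Int) from by omega]
      rw [PySem.List.pyGet?_natCast, List.getElem?_append_left (by omega),
        ← List.getLast?_eq_getElem?]
      exact hlast
    rw [hget1, hget0]
    have e1 : (pre.length : Int) + 1 = (((pre ++ [x]).length : Nat) : Int) := by
      simp
    have e2 : ((pre.length + (x :: xs).length : Nat) : Int)
        = (((pre ++ [x]).length + xs.length : Nat) : Int) := by
      simp; ring
    have e3 : pre ++ x :: xs = (pre ++ [x]) ++ xs := by simp
    by_cases hx : (x == prev) = true
    · rw [if_pos (by simp [eq_of_beq hx])]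
      rw [e3, e1, e2,
        ih (pre ++ [x]) x (max p.1 (p.2 + 1), p.2 + 1) (by simp) (by simp)]
      simp [scanRun, hx]
    · have hx' : (x == prev) = false := by simpa using hx
      rw [if_neg (by simp [hx'])]
      rw [e3, e1, e2, ih (pre ++ [x]) x (p.1, 1) (by simp) (by simp)]
      simp [scanRun, hx']

theorem foldA_cons (x : Char) (xs : List Char) :
    (PySem.List.pyRange 1 (((x :: xs).length : Nat) : Int) 1).foldl
      (fun (p : Int × Int) i =>
        if PySem.List.pyGet? (x :: xs) i == PySem.List.pyGet? (x :: xs) (i - 1) then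
          (max p.1 (p.2 + 1), p.2 + 1)
        else (p.1, 1)) (1, 1) = scanRun x (1, 1) xs := by
  have h := foldA_aux xs [x] x (1, 1) (by simp) (by simp)
  simp only [List.singleton_append, List.length_cons, List.length_nil] at h
  push_cast at h
  simp only [List.length_cons]
  push_cast
  rw [show ((xs.length : Int) + 1) = 1 + (xs.length : Int) from by ring]
  exact h

theorem pyGet?_cons_shift (t : List Char) (a : Char) (i : Int) (hi : 0 ≤ i) :
    PySem.List.pyGet? (a :: t) (i + 1) = PySem.List.pyGet? t i := by
  lift i to Nat using hi
  exact PySem.List.pyGet?_cons_succ a t i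

theorem any_shift (f : Int → Bool) (m : Int) :
    (PySem.List.pyRange 1 (m + 1) 1).any f
      = (PySem.List.pyRange 0 m 1).any (fun k => f (k + 1)) := by
  rw [PySem.List.pyRange_one, PySem.List.pyRange_one]
  simp only [List.any_map]
  rw [show m + 1 - 1 = m - 0 from by ring]
  apply PySem.List.any_congr_mem
  intro k _
  simp only [Function.comp]
  exact congrArg f (by ring)

theorem anyB_eq_hasRun4 (cs : List Char) :
    ((PySem.List.pyRange 0 ((cs.length : Int) - 3) 1).any (fun i =>
        (PySem.List.pyGet? cs i == PySem.List.pyGet? cs (i + 1)) &&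
        (PySem.List.pyGet? cs (i + 1) == PySem.List.pyGet? cs (i + 2)) &&
        (PySem.List.pyGet? cs (i + 2) == PySem.List.pyGet? cs (i + 3)))) = hasRun4 cs := by
  induction cs with
  | nil =>
    rw [PySem.List.pyRange_one_eq_nil (by simp)]
    rfl
  | cons a t ih =>
    by_cases hlen : 3 ≤ t.length
    · rcases t with _ | ⟨b, _ | ⟨c, _ | ⟨d, r⟩⟩⟩ <;> try (simp at hlen)
      -- t = b :: c :: d :: r
      rw [show (((a :: b :: c :: d :: r).length : Nat) : Int) - 3 = ((r.length : Int) + 1) from by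
        push_cast [List.length_cons]; ring]
      rw [PySem.List.pyRange_one_cons (by omega)]
      simp only [List.any_cons]
      rw [show PySem.List.pyRange ((0 : Int) + 1) ((r.length : Int) + 1) 1
            = PySem.List.pyRange 1 ((r.length : Int) + 1) 1 from by norm_num]
      rw [any_shift]
      have hptw : ∀ i ∈ PySem.List.pyRange 0 ((r.length : Int)) 1,
          ((PySem.List.pyGet? (a :: b :: c :: d :: r) (i + 1) ==
              PySem.List.pyGet? (a :: b :: c :: d :: r) (i + 1 + 1)) &&
            (PySem.List.pyGet? (a :: b :: c :: d :: r) (i + 1 + 1) ==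
              PySem.List.pyGet? (a :: b :: c :: d :: r) (i + 1 + 2)) &&
            (PySem.List.pyGet? (a :: b :: c :: d :: r) (i + 1 + 2) ==
              PySem.List.pyGet? (a :: b :: c :: d :: r) (i + 1 + 3)))
          = ((PySem.List.pyGet? (b :: c :: d :: r) i == PySem.List.pyGet? (b :: c :: d :: r) (i + 1)) &&
            (PySem.List.pyGet? (b :: c :: d :: r) (i + 1) == PySem.List.pyGet? (b :: c :: d :: r) (i + 2)) &&
            (PySem.List.pyGet? (b :: c :: d :: r) (i + 2) == PySem.List.pyGet? (b :: c :: d :: r) (i + 3))) := by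
        intro i hmem
        have hi : 0 ≤ i := ((PySem.List.mem_pyRange_one).mp hmem).1
        rw [show i + 1 + 1 = (i + 1) + 1 from by ring, show i + 1 + 2 = (i + 2) + 1 from by ring,
          show i + 1 + 3 = (i + 3) + 1 from by ring]
        rw [pyGet?_cons_shift (b :: c :: d :: r) a i hi,
          pyGet?_cons_shift (b :: c :: d :: r) a (i + 1) (by omega),
          pyGet?_cons_shift (b :: c :: d :: r) a (i + 2) (by omega),
          pyGet?_cons_shift (b :: c :: d :: r) a (i + 3) (by omega)]
      rw [PySem.List.any_congr_mem hptw]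
      have hbound : ((r.length : Int)) = (((b :: c :: d :: r).length : Nat) : Int) - 3 := by
        push_cast [List.length_cons]; ring
      rw [hbound, ih]
      have hhead :
          ((PySem.List.pyGet? (a :: b :: c :: d :: r) 0 ==
              PySem.List.pyGet? (a :: b :: c :: d :: r) (0 + 1)) &&
            (PySem.List.pyGet? (a :: b :: c :: d :: r) (0 + 1) ==
              PySem.List.pyGet? (a :: b :: c :: d :: r) (0 + 2)) &&
            (PySem.List.pyGet? (a :: b :: c :: d :: r) (0 + 2) ==
              PySem.List.pyGet? (a :: b :: c :: d :: r) (0 + 3)))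
          = (a == b && b == c && c == d) := by
        rw [show (0 : Int) + 2 = (0 + 1) + 1 from by ring, show (0 : Int) + 3 = ((0 + 1) + 1) + 1 from by ring]
        rw [pyGet?_cons_shift (b :: c :: d :: r) a 0 le_rfl,
          pyGet?_cons_shift (b :: c :: d :: r) a (0 + 1) (by omega),
          pyGet?_cons_shift (b :: c :: d :: r) a ((0 + 1) + 1) (by omega),
          pyGet?_cons_shift (c :: d :: r) b 0 le_rfl,
          pyGet?_cons_shift (c :: d :: r) b (0 + 1) (by omega),
          pyGet?_cons_shift (d :: r) c 0 le_rfl]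
        rw [PySem.List.pyGet?_zero_cons, PySem.List.pyGet?_zero_cons, PySem.List.pyGet?_zero_cons,
          PySem.List.pyGet?_zero_cons]
        rfl
      rw [hhead]
      simp [hasRun4]
    · rw [PySem.List.pyRange_one_eq_nil (by simp; omega)]
      exact (hasRun4_short _ (by simp; omega)).symm

-- ===== VERDICT (by name: the statement is the Claim_ definition above) =====
theorem repeated_characters_rule_spec : Claim_equal_repeated_characters_rule := by
  intro password _
  unfold Spec_repeated_characters_rule repeated_characters_rule repeated_characters_rule_alt
  cases hcs : password.toList with
  | nil =>
    rw [show ((List.length ([] : List Char) : Nat) : Int) - 3 = -3 from by simp,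
      PySem.List.pyRange_one_eq_nil (by norm_num)]
    simp
  | cons x xs =>
    rw [if_neg (show ¬(((x :: xs).isEmpty) = true) from by simp)]
    rw [foldA_cons x xs, anyB_eq_hasRun4 (x :: xs)]
    have hrun : needRun x 3 xs = hasRun4 (x :: xs) := by
      rw [needRun_eq xs x 3 (by omega) (by omega), leadEq_or_hasRun]
    have hiff : 4 ≤ (scanRun x (1, 1) xs).1 ↔ (hasRun4 (x :: xs) = true) := by
      rw [scanRun_ge4 xs x 1 1 le_rfl le_rfl,
        show ((4 : Int) - 1).toNat = 3 from by decide]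
      constructor
      · rintro (h | h)
        · omega
        · rwa [hrun] at h
      · intro h
        exact Or.inr (hrun ▸ h)
    by_cases hr : hasRun4 (x :: xs) = true
    · rw [if_pos (hiff.mpr hr), if_pos hr]
    · rw [if_neg (fun hc => hr (hiff.mp hc)), if_neg hr]
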